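-- pv_equiv track=rewrite | github.com/RedHorizonss/apprOXimate | approx/feature_engineering/magnetic_moment_features.py | fill_orbitals
-- ===== SOURCE A (Python) =====
-- def fill_orbitals(nelect: int, norb: int):
--     """
--     Fills orbitals following Hund's rule.
--
--     Args:
--         nelect: total electrons in the subshell
--         norb: number of orbitals (1=s, 3=p, 5=d, 7=f)
--
--     Returns:
--         A list of orbital occupancies:
--         [1,1,1,0,0] etc.
--     """
--     occ = [0] * norb
--
--     # First pass: singly fill
--     for i in range(min(nelect, norb)):
--         occ[i] = 1
--
--     # Second pass: pair up remaining electrons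
--     rem = nelect - norb
--     if rem > 0:
--         for i in range(min(rem, norb)):
--             occ[i] += 1
--
--     return occ
-- ===== SOURCE B (Python) =====
-- def fill_orbitals(nelect: int, norb: int):
--     """Hund's-rule occupancies by closed-form block counts: no per-orbital loop."""
--     filled = max(0, min(nelect, norb))
--     doubles = max(0, min(nelect - norb, norb))
--     singles = filled - doubles
--     zeros = norb - filled
--     return [2] * doubles + [1] * singles + [0] * zeros
-- ===== Notes on version B (the rewrite author's own statement) =====
-- stated objective: simpler
-- what changed: Replaces the allocate-then-two-indexed-mutation-passes loop with a closed-form computation of the three block sizes (doubly, singly, unoccupied) and a concatenation of replicated blocks.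
import Mathlib
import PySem

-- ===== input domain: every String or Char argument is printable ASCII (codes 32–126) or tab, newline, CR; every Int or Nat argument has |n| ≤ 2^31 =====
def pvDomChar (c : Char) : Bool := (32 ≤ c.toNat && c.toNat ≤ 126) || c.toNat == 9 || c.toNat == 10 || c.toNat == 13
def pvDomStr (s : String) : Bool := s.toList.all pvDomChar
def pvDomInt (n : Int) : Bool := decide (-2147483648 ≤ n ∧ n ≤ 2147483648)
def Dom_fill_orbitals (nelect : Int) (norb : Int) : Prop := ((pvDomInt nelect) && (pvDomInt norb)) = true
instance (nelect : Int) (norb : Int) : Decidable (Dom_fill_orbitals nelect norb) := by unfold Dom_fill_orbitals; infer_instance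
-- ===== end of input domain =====

-- B builds the result as closed-form counted blocks [2]*doubles ++ [1]*singles ++ [0]*zeros
-- instead of A's allocate-then-mutate two indexed passes (objective: simpler).

-- ===== PORT A =====
def fill_orbitals (nelect : Int) (norb : Int) : List Int :=
  -- occ = [0] * norb
  let occ : List Int := List.replicate norb.toNat 0
  -- for i in range(min(nelect, norb)): occ[i] = 1
  let occ := (PySem.List.pyRange 0 (min nelect norb) 1).foldl
      (fun a i => PySem.List.pySetD a i 1) occ
  -- rem = nelect - norb
  let rem := nelect - norb
  -- if rem > 0: for i in range(min(rem, norb)): occ[i] += 1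
  if rem > 0 then
    (PySem.List.pyRange 0 (min rem norb) 1).foldl
      (fun a i => PySem.List.pySetD a i (PySem.List.pyGetD a i 0 + 1)) occ
  else occ

-- ===== PORT B =====
def fill_orbitals_alt (nelect : Int) (norb : Int) : List Int :=
  let filled := max 0 (min nelect norb)
  let doubles := max 0 (min (nelect - norb) norb)
  let singles := filled - doubles
  let zeros := norb - filled
  List.replicate doubles.toNat 2 ++ List.replicate singles.toNat 1 ++ List.replicate zeros.toNat 0

-- ===== PRECONDITION & SPEC =====
def Spec_fill_orbitals (nelect : Int) (norb : Int) (out : List Int) : Prop := out = fill_orbitals_alt nelect norb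
instance (nelect : Int) (norb : Int) (out : List Int) : Decidable (Spec_fill_orbitals nelect norb out) := by unfold Spec_fill_orbitals; infer_instance

-- ===== CLAIM (what is proved, stated in full; the proofs are below) =====
def Claim_equal_fill_orbitals : Prop := ∀ (nelect : Int) (norb : Int), Dom_fill_orbitals nelect norb → Spec_fill_orbitals nelect norb (fill_orbitals nelect norb)

-- ===== LEMMAS AND PROOFS =====

-- Setting the element right after a prefix of known length.
lemma pv_set_mid (p : List Int) (x v : Int) (t : List Int) (n : Nat) (h : n = p.length) :
    (p ++ x :: t).set n v = p ++ v :: t := by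
  subst h
  induction p with
  | nil => rfl
  | cons a p ih => simp [ih]

-- Reading the element right after a prefix of known length.
lemma pv_getD_mid (p : List Int) (x : Int) (t : List Int) (n : Nat) (h : n = p.length) :
    (p ++ x :: t).getD n 0 = x := by
  subst h
  induction p with
  | nil => rfl
  | cons a p _ => simp

-- First pass of A: setting indices 0..m-1 to a constant yields a replicate-prefix.
lemma foldl_set_const (v : Int) : ∀ (m : Nat) (l : List Int), m ≤ l.length →
    (List.range m).foldl (fun a k => a.set k v) l = List.replicate m v ++ l.drop m := by
  intro m
  induction m with
  | zero => intro l _; simp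
  | succ m ih =>
    intro l hm
    rw [List.range_succ, List.foldl_append, ih l (by omega)]
    have hlt : m < l.length := by omega
    rw [List.drop_eq_getElem_cons hlt]
    simp only [List.foldl_cons, List.foldl_nil]
    rw [pv_set_mid _ _ _ _ _ (by simp)]
    simp [List.replicate_succ']

-- Second pass of A: incrementing indices 0..m-1 maps (+1) over the prefix.
lemma foldl_set_incr : ∀ (m : Nat) (l : List Int), m ≤ l.length →
    (List.range m).foldl (fun a k => a.set k (a.getD k 0 + 1)) l
      = (l.take m).map (· + 1) ++ l.drop m := by
  intro m
  induction m with
  | zero => intro l _; simp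
  | succ m ih =>
    intro l hm
    rw [List.range_succ, List.foldl_append, ih l (by omega)]
    have hlt : m < l.length := by omega
    rw [List.drop_eq_getElem_cons hlt]
    simp only [List.foldl_cons, List.foldl_nil]
    rw [pv_getD_mid _ _ _ _ (by simp; omega), pv_set_mid _ _ _ _ _ (by simp; omega)]
    rw [List.take_add_one, List.getElem?_eq_getElem hlt]
    simp
    rw [List.take_add_one]
    simp [List.getElem?_map, List.getElem?_eq_getElem hlt]

-- A's first loop over a Python range, in terms of foldl_set_const.
lemma pyloop_const (M : Int) (l : List Int) (h : M.toNat ≤ l.length) :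
    (PySem.List.pyRange 0 M 1).foldl (fun a i => PySem.List.pySetD a i 1) l
      = List.replicate M.toNat 1 ++ l.drop M.toNat := by
  rw [PySem.List.pyRange_one, List.foldl_map]
  have hM : M - 0 = M := by ring
  rw [hM]
  have hf : (fun (a : List Int) (k : Nat) => PySem.List.pySetD a ((0:Int) + (k:Int)) 1)
      = fun (a : List Int) (k : Nat) => a.set k 1 := by
    funext a k
    rw [show (0:Int) + (k:Int) = (k:Int) by ring]
    simp [PySem.List.pySetD_of_nonneg]
  rw [hf]
  exact foldl_set_const 1 M.toNat l h

-- A's second loop over a Python range, in terms of foldl_set_incr.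
lemma pyloop_incr (M : Int) (l : List Int) (h : M.toNat ≤ l.length) :
    (PySem.List.pyRange 0 M 1).foldl
        (fun a i => PySem.List.pySetD a i (PySem.List.pyGetD a i 0 + 1)) l
      = (l.take M.toNat).map (· + 1) ++ l.drop M.toNat := by
  rw [PySem.List.pyRange_one, List.foldl_map]
  have hM : M - 0 = M := by ring
  rw [hM]
  have hf : (fun (a : List Int) (k : Nat) =>
        PySem.List.pySetD a ((0:Int) + (k:Int)) (PySem.List.pyGetD a ((0:Int) + (k:Int)) 0 + 1))
      = fun (a : List Int) (k : Nat) => a.set k (a.getD k 0 + 1) := by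
    funext a k
    rw [show (0:Int) + (k:Int) = (k:Int) by ring]
    simp [PySem.List.pySetD_of_nonneg, PySem.List.pyGetD_natCast]
  rw [hf]
  exact foldl_set_incr M.toNat l h

theorem fill_orbitals_eq_alt (nelect norb : Int) :
    fill_orbitals nelect norb = fill_orbitals_alt nelect norb := by
  simp only [fill_orbitals, fill_orbitals_alt]
  have hk : (min nelect norb).toNat ≤ (List.replicate norb.toNat (0:Int)).length := by
    simp
  split_ifs with hrem
  · -- rem > 0: first loop fills everything with 1, second pairs up a prefix
    rw [pyloop_const _ _ hk]
    have hmin : (min nelect norb).toNat = norb.toNat := by omega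
    rw [hmin, List.drop_replicate]
    have hm : (min (nelect - norb) norb).toNat ≤ (List.replicate norb.toNat (1:Int)
        ++ List.replicate (norb.toNat - norb.toNat) 0).length := by
      simp
    rw [pyloop_incr _ _ hm]
    have h2 : (max 0 (min (nelect - norb) norb)).toNat = (min (nelect - norb) norb).toNat := by
      omega
    have h1 : (max 0 (min nelect norb) - max 0 (min (nelect - norb) norb)).toNat
        = norb.toNat - (min (nelect - norb) norb).toNat := by omega
    have h0 : (norb - max 0 (min nelect norb)).toNat = 0 := by omega
    rw [h2, h1, h0]
    simp [List.take_replicate, List.drop_replicate]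
  · -- rem ≤ 0: only the first loop runs
    rw [pyloop_const _ _ hk]
    have h2 : (max 0 (min (nelect - norb) norb)).toNat = 0 := by omega
    have h1 : (max 0 (min nelect norb) - max 0 (min (nelect - norb) norb)).toNat
        = (min nelect norb).toNat := by omega
    have h0 : (norb - max 0 (min nelect norb)).toNat = norb.toNat - (min nelect norb).toNat := by
      omega
    rw [h2, h1, h0, List.drop_replicate]
    simp

-- ===== VERDICT (by name: the statement is the Claim_ definition above) =====
theorem fill_orbitals_spec : Claim_equal_fill_orbitals := by
  intro nelect norb _
  exact fill_orbitals_eq_alt nelect norb
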